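-- pv_equiv track=rewrite | github.com/alexlm78/AoC | 2024/Day09/solve_day09.py | build_free_spans
-- ===== SOURCE A (Python) =====
-- def build_free_spans(blocks: list[int | None]) -> list[tuple[int, int]]:
--     spans: list[tuple[int, int]] = []
--     i = 0
--     n = len(blocks)
--     while i < n:
--         if blocks[i] is None:
--             start = i
--             while i < n and blocks[i] is None:
--                 i += 1
--             spans.append((start, i - start))
--         else:
--             i += 1
--     return spans
-- ===== SOURCE B (Python) =====
-- def build_free_spans(blocks: list) -> list:
--     free = [b is None for b in blocks]
--     starts = [i for i, (prev, cur) in enumerate(zip([False] + free, free)) if cur and not prev]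
--     ends = [i for i, (cur, nxt) in enumerate(zip(free, free[1:] + [False])) if cur and not nxt]
--     return [(s, e - s + 1) for s, e in zip(starts, ends)]
-- ===== Notes on version B (the rewrite author's own statement) =====
-- stated objective: alternative
-- what changed: Replaced the stateful index/while run-walk by stateless boundary detection: build a boolean free-mask, find run starts (free and previous not free) and run ends (free and next not free) as two independent edge-detection passes over shifted zips, and zip starts with ends to form the spans.
import Mathlib
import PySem

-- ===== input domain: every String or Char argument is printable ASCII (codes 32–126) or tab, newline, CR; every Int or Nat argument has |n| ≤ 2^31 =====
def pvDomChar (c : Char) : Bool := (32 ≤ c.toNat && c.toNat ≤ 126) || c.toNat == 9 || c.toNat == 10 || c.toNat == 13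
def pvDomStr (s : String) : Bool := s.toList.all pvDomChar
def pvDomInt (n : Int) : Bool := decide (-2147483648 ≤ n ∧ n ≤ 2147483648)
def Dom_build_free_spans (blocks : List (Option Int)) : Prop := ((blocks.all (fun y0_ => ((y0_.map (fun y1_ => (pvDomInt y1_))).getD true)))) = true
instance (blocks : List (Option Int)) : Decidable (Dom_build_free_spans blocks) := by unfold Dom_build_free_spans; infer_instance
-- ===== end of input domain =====

-- B replaces A's stateful index/while run-walk by stateless edge detection over shifted
-- boolean masks (starts, ends, zip); alternative decomposition, same O(n) cost.

-- ===== PORT A =====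
-- inner `while i < n and blocks[i] is None: i += 1`, expressed as the number of steps
-- it takes on the remaining suffix
def pvInnerWhile : List (Option Int) → Nat
  | none :: rest => pvInnerWhile rest + 1
  | _ => 0

-- outer `while i < n`, walking the suffix of `blocks` starting at index i
def pvAWhile : List (Option Int) → Int → List (Int × Int)
  | [], _ => []
  | none :: rest, i =>
      let k := pvInnerWhile (none :: rest)
      (i, (k : Int)) :: pvAWhile ((none :: rest).drop k) (i + k)
  | some _ :: rest, i => pvAWhile rest (i + 1)
termination_by l _ => l.length
decreasing_by
  · simp [pvInnerWhile]
  · simp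

def build_free_spans (blocks : List (Option Int)) : List (Int × Int) :=
  pvAWhile blocks 0

-- ===== PORT B =====
-- enumerate(xs) with Python int indices
def pvEnum {α : Type} : Int → List α → List (Int × α)
  | _, [] => []
  | i, x :: rest => (i, x) :: pvEnum (i + 1) rest

-- free = [b is None for b in blocks]
-- starts = [i for i,(prev,cur) in enumerate(zip([False]+free, free)) if cur and not prev]
-- ends   = [i for i,(cur,nxt) in enumerate(zip(free, free[1:]+[False])) if cur and not nxt]
-- (free[1:] on a list is List.drop 1 — exact for this nonnegative slice)
def build_free_spans_alt (blocks : List (Option Int)) : List (Int × Int) :=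
  let free := blocks.map (fun b => b.isNone)
  let starts := (pvEnum 0 ((false :: free).zip free)).filterMap
    (fun p => if p.2.2 && !p.2.1 then some p.1 else none)
  let ends := (pvEnum 0 (free.zip (free.drop 1 ++ [false]))).filterMap
    (fun p => if p.2.1 && !p.2.2 then some p.1 else none)
  (starts.zip ends).map (fun se => (se.1, se.2 - se.1 + 1))

-- ===== PRECONDITION & SPEC =====
def Spec_build_free_spans (blocks : List (Option Int)) (out : List (Int × Int)) : Prop := out = build_free_spans_alt blocks
instance (blocks : List (Option Int)) (out : List (Int × Int)) : Decidable (Spec_build_free_spans blocks out) := by unfold Spec_build_free_spans; infer_instance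

-- ===== CLAIM (what is proved, stated in full; the proofs are below) =====
def Claim_equal_build_free_spans : Prop := ∀ (blocks : List (Option Int)), Dom_build_free_spans blocks → Spec_build_free_spans blocks (build_free_spans blocks)

-- ===== LEMMAS AND PROOFS =====

-- recursive characterization of B's `starts` pass (prev flag threaded)
def pvSA : Bool → Int → List Bool → List Int
  | _, _, [] => []
  | p, i, c :: t => (if c && !p then [i] else []) ++ pvSA c (i + 1) t

-- recursive characterization of B's `ends` pass (looks one ahead)
def pvEA : Int → List Bool → List Int
  | _, [] => []
  | i, [c] => if c then [i] else []
  | i, c :: d :: t => (if c && !d then [i] else []) ++ pvEA (i + 1) (d :: t)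

lemma pvStarts_eq (free : List Bool) (p : Bool) (i : Int) :
    (pvEnum i ((p :: free).zip free)).filterMap
      (fun q => if q.2.2 && !q.2.1 then some q.1 else none) = pvSA p i free := by
  induction free generalizing p i with
  | nil => rfl
  | cons c t ih =>
    simp only [List.zip_cons_cons, pvEnum, List.filterMap_cons, pvSA]
    rw [ih c (i + 1)]
    cases c <;> cases p <;> simp

lemma pvEnds_eq (free : List Bool) (i : Int) :
    (pvEnum i (free.zip (free.drop 1 ++ [false]))).filterMap
      (fun q => if q.2.1 && !q.2.2 then some q.1 else none) = pvEA i free := by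
  induction free generalizing i with
  | nil => rfl
  | cons c t ih =>
    cases t with
    | nil => cases c <;> rfl
    | cons d t' =>
      simp only [List.drop_one, List.tail_cons, List.cons_append, List.zip_cons_cons,
        pvEnum, List.filterMap_cons, pvEA]
      have := ih (i + 1)
      simp only [List.drop_one, List.tail_cons] at this
      rw [this]
      cases c <;> cases d <;> simp

-- skipping a leading none-run in the starts pass with prev-flag true emits nothing
lemma pvSA_skip (r : List (Option Int)) (i : Int) :
    pvSA true i (r.map Option.isNone) =
      pvSA false (i + pvInnerWhile r) ((r.drop (pvInnerWhile r)).map Option.isNone) := by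
  induction r generalizing i with
  | nil => simp [pvInnerWhile, pvSA]
  | cons x t ih =>
    cases x with
    | some v => simp [pvInnerWhile, pvSA]
    | none =>
      have h : pvSA true i (List.map Option.isNone (none :: t)) =
          pvSA true (i + 1) (List.map Option.isNone t) := by simp [pvSA]
      rw [h, ih (i + 1)]
      have hk : pvInnerWhile (none :: t) = pvInnerWhile t + 1 := rfl
      have hd : List.drop (pvInnerWhile (none :: t)) (none :: t) = List.drop (pvInnerWhile t) t := by
        rw [hk]; rfl
      rw [hd, hk]
      congr 1
      push_cast; ring

-- the ends pass on a leading none-run: emits the run's last index, then continues after it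
lemma pvEA_run (r : List (Option Int)) (i : Int) :
    pvEA i (true :: r.map Option.isNone) =
      (i + pvInnerWhile r) :: pvEA (i + 1 + pvInnerWhile r) ((r.drop (pvInnerWhile r)).map Option.isNone) := by
  induction r generalizing i with
  | nil => simp [pvInnerWhile, pvEA]
  | cons x t ih =>
    cases x with
    | some v => simp [pvInnerWhile, pvEA]
    | none =>
      have h : pvEA i (true :: List.map Option.isNone (none :: t)) =
          pvEA (i + 1) (true :: List.map Option.isNone t) := by simp [pvEA]
      rw [h, ih (i + 1)]
      have hk : pvInnerWhile (none :: t) = pvInnerWhile t + 1 := rfl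
      have hd : List.drop (pvInnerWhile (none :: t)) (none :: t) = List.drop (pvInnerWhile t) t := by
        rw [hk]; rfl
      rw [hd]
      have e1 : i + 1 + (pvInnerWhile t : Int) = i + ((pvInnerWhile (none :: t) : ℕ) : ℤ) := by
        rw [hk]; push_cast; ring
      have e2 : i + 1 + 1 + (pvInnerWhile t : Int) = i + 1 + ((pvInnerWhile (none :: t) : ℕ) : ℤ) := by
        rw [hk]; push_cast; ring
      rw [e1, e2]

lemma pvEA_false_cons (t : List Bool) (i : Int) :
    pvEA i (false :: t) = pvEA (i + 1) t := by
  cases t <;> simp [pvEA]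

-- A's while loop equals B's zip of the starts and ends passes, on any suffix at any index
lemma pvMain : ∀ n l i, l.length ≤ n →
    pvAWhile l i =
      ((pvSA false i (l.map Option.isNone)).zip (pvEA i (l.map Option.isNone))).map
        (fun se => (se.1, se.2 - se.1 + 1)) := by
  intro n
  induction n with
  | zero =>
    intro l i hl
    have : l = [] := List.eq_nil_of_length_eq_zero (Nat.le_zero.mp hl)
    subst this; simp [pvAWhile, pvSA, pvEA]
  | succ m ih =>
    intro l i hl
    cases l with
    | nil => simp [pvAWhile, pvSA, pvEA]
    | cons x rest =>
      cases x with
      | some v =>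
        rw [pvAWhile, ih rest (i + 1) (by simpa using Nat.lt_succ_iff.mp (by simpa using hl))]
        simp [pvSA, pvEA_false_cons]
      | none =>
        rw [pvAWhile]
        have hk : pvInnerWhile (none :: rest) = pvInnerWhile rest + 1 := rfl
        have hdrop : (none :: rest).drop (pvInnerWhile (none :: rest)) = rest.drop (pvInnerWhile rest) := by
          rw [hk]; rfl
        have hlen : (rest.drop (pvInnerWhile rest)).length ≤ m := by
          simp only [List.length_drop]
          simp at hl
          omega
        rw [hdrop, ih _ _ hlen]
        simp only [List.map_cons, Option.isNone_none]
        have hS : pvSA false i (true :: List.map Option.isNone rest) =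
            i :: pvSA true (i + 1) (List.map Option.isNone rest) := by simp [pvSA]
        rw [hS, pvSA_skip rest (i + 1), pvEA_run rest i]
        simp only [List.zip_cons_cons, List.map_cons]
        have e3 : i + ((pvInnerWhile (none :: rest) : ℕ) : ℤ) = i + 1 + (pvInnerWhile rest : Int) := by
          rw [hk]; push_cast; ring
        have e0 : ((pvInnerWhile (none :: rest) : ℕ) : ℤ) = i + (pvInnerWhile rest : Int) - i + 1 := by
          rw [hk]; push_cast; ring
        rw [e3, e0]

-- ===== VERDICT (by name: the statement is the Claim_ definition above) =====
theorem build_free_spans_spec : Claim_equal_build_free_spans := by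
  intro blocks _
  unfold Spec_build_free_spans build_free_spans
  simp only [build_free_spans_alt]
  rw [pvStarts_eq, pvEnds_eq, pvMain blocks.length blocks 0 le_rfl]
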